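-- pv_equiv track=rewrite | github.com/ranonymousse/cdv-explorer | paper/RQ3/collaboration_common.py | build_collaboration_component_size_distribution
-- ===== SOURCE A (Python) =====
-- from collections import defaultdict, deque
--
-- def build_collaboration_adjacency(collaboration_network: dict) -> tuple[list[str], dict[str, list[dict[str, int | str]]], dict[str, int]]:
--     raw_nodes = collaboration_network.get("nodes", []) or []
--     raw_edges = collaboration_network.get("edges", []) or []
--     node_ids = [str(node.get("id")) for node in raw_nodes if node.get("id")]
--
--     adjacency = {node_id: [] for node_id in node_ids}
--     weighted_degree_by_author = {node_id: 0 for node_id in node_ids}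
--
--     for edge in raw_edges:
--         source = str(edge.get("source"))
--         target = str(edge.get("target"))
--         weight = int(edge.get("weight", 1) or 1)
--
--         adjacency.setdefault(source, [])
--         adjacency.setdefault(target, [])
--         weighted_degree_by_author.setdefault(source, 0)
--         weighted_degree_by_author.setdefault(target, 0)
--
--         adjacency[source].append({"id": target, "weight": weight})
--         adjacency[target].append({"id": source, "weight": weight})
--         weighted_degree_by_author[source] += weight
--         weighted_degree_by_author[target] += weight
--
--     return node_ids, adjacency, weighted_degree_by_author
--
-- def build_true_collaboration_components(collaboration_network: dict) -> list[list[str]]: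
--     node_ids, adjacency, _ = build_collaboration_adjacency(collaboration_network)
--
--     visited = set()
--     components = []
--     for node_id in node_ids:
--         if node_id in visited:
--             continue
--
--         queue = deque([node_id])
--         members = []
--         visited.add(node_id)
--
--         while queue:
--             current = queue.popleft()
--             members.append(current)
--
--             for neighbor in adjacency.get(current, []):
--                 neighbor_id = str(neighbor["id"])
--                 if neighbor_id in visited:
--                     continue
--                 visited.add(neighbor_id)
--                 queue.append(neighbor_id)
--
--         components.append(members)
--
--     components.sort(key=len, reverse=True)
--     return components
--
-- def build_collaboration_component_size_distribution(collaboration_network: dict) -> list[dict[str, int]]: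
--     component_size_counts = defaultdict(int)
--
--     for members in build_true_collaboration_components(collaboration_network):
--         component_size_counts[len(members)] += 1
--
--     return [
--         {
--             "cluster_size": int(cluster_size),
--             "cluster_count": int(cluster_count),
--             "author_count": int(cluster_size) * int(cluster_count),
--         }
--         for cluster_size, cluster_count in sorted(component_size_counts.items())
--     ]
-- ===== SOURCE B (Python) =====
-- def build_collaboration_component_size_distribution(collaboration_network: dict) -> list[dict[str, int]]:
--     nodes = collaboration_network.get("nodes") or []
--     edges = collaboration_network.get("edges") or []
--     node_ids = [str(n.get("id")) for n in nodes if n.get("id")]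
--     pairs = [(str(e.get("source")), str(e.get("target"))) for e in edges]
--
--     def component(seed):
--         # grow the reachable set until it stops changing
--         comp = {seed}
--         while True:
--             grown = comp | {t for s, t in pairs if s in comp} | {s for s, t in pairs if t in comp}
--             if grown == comp:
--                 return tuple(sorted(comp))
--             comp = grown
--
--     clusters = {component(a) for a in node_ids}
--     tally = {}
--     for c in clusters:
--         tally[len(c)] = tally.get(len(c), 0) + 1
--     return [
--         {"cluster_size": s, "cluster_count": k, "author_count": s * k}
--         for s, k in sorted(tally.items())
--     ]
-- ===== Notes on version B (the rewrite author's own statement) =====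
-- stated objective: alternative
-- what changed: Replaces the adjacency-dict + per-seed BFS queue with a global visited set by a per-author fixpoint closure of the raw edge-pair relation (grow the reachable set until it stops changing), deduplicating sorted components as canonical tuples and tallying their sizes; B never parses edge weights. Pre_ excludes inputs where A raises ValueError on an unparsable edge weight string.
import Mathlib
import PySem

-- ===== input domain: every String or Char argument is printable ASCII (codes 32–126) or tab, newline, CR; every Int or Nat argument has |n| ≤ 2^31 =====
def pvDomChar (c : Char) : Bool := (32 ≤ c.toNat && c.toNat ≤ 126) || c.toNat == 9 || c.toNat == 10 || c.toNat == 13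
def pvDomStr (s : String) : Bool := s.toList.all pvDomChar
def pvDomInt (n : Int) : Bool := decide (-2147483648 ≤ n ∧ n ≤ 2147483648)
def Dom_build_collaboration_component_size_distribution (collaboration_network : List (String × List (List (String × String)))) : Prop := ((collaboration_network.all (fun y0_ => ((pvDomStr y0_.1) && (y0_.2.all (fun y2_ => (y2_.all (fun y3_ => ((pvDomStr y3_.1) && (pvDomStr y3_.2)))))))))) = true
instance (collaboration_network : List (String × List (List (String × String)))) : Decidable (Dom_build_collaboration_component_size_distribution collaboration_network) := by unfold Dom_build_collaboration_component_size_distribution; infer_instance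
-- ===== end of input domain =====

-- B replaces A's three-stage BFS pipeline (adjacency dict + per-seed queue BFS with a global
-- visited set) by a per-author fixpoint closure of the raw edge-pair relation (grow the set until
-- it stops changing), deduplicating the sorted components as canonical tuples and tallying their
-- sizes (objective: alternative).
-- A raises ValueError on a non-integer edge "weight" string; those inputs are outside Pre_.

-- ===== PORT A =====
-- int(edge.get("weight", 1) or 1): none = ValueError
def pvWeightOf (edge : List (String × String)) : Option Int :=
  match (PySem.Dict.mk edge).get? "weight" with
  | none => some 1
  | some s => if s = "" then some 1 else PySem.Int.ofStr? s

def pvNodeIds (raw_nodes : List (List (String × String))) : List String :=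
  raw_nodes.filterMap (fun node =>
    match (PySem.Dict.mk node).get? "id" with
    | some s => if s = "" then none else some s
    | none => none)

-- the `for edge in raw_edges` loop of build_collaboration_adjacency
def pvAdjacencyLoop (raw_edges : List (List (String × String)))
    (adj : PySem.Dict String (List (String × Int))) (deg : PySem.Dict String Int) :
    Option (PySem.Dict String (List (String × Int)) × PySem.Dict String Int) :=
  match raw_edges with
  | [] => some (adj, deg)
  | edge :: rest =>
    let source := ((PySem.Dict.mk edge).get? "source").getD "None"
    let target := ((PySem.Dict.mk edge).get? "target").getD "None"
    match pvWeightOf edge with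
    | none => none
    | some weight =>
      let adj1 := (adj.setdefault source []).setdefault target []
      let deg1 := (deg.setdefault source 0).setdefault target 0
      let adj2 := adj1.modify source [] (fun l => l ++ [(target, weight)])
      let adj3 := adj2.modify target [] (fun l => l ++ [(source, weight)])
      let deg2 := deg1.modify source 0 (fun x => x + weight)
      let deg3 := deg2.modify target 0 (fun x => x + weight)
      pvAdjacencyLoop rest adj3 deg3

def pvBuildAdjacency (cn : List (String × List (List (String × String)))) :
    Option (List String × PySem.Dict String (List (String × Int)) × PySem.Dict String Int) :=
  let raw_nodes0 := (PySem.Dict.mk cn).getD "nodes" []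
  let raw_nodes := if raw_nodes0 = [] then [] else raw_nodes0      -- `or []`
  let raw_edges0 := (PySem.Dict.mk cn).getD "edges" []
  let raw_edges := if raw_edges0 = [] then [] else raw_edges0      -- `or []`
  let node_ids := pvNodeIds raw_nodes
  let adjacency := node_ids.foldl (fun d k => d.insert k ([] : List (String × Int))) PySem.Dict.empty
  let degrees := node_ids.foldl (fun d k => d.insert k (0 : Int)) PySem.Dict.empty
  match pvAdjacencyLoop raw_edges adjacency degrees with
  | none => none
  | some (adj, deg) => some (node_ids, adj, deg)

-- the `while queue` BFS loop; fuel is a totality device only (lemmas show it never runs out)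
def pvBfs (adjacency : PySem.Dict String (List (String × Int))) :
    Nat → List String → PySem.Set String → List String → List String × PySem.Set String
  | _, [], visited, members => (members, visited)
  | 0, _ :: _, visited, members => (members, visited)
  | fuel + 1, current :: queue, visited, members =>
    let members1 := members ++ [current]
    let vq := (adjacency.getD current []).foldl
      (fun (vq : PySem.Set String × List String) neighbor =>
        let neighbor_id := neighbor.1
        if vq.1.contains neighbor_id then vq
        else (vq.1.add neighbor_id, vq.2 ++ [neighbor_id])) (visited, queue)
    pvBfs adjacency fuel vq.2 vq.1 members1

-- the `for node_id in node_ids` loop of build_true_collaboration_components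
def pvComponentsLoop (adjacency : PySem.Dict String (List (String × Int))) (fuel : Nat) :
    List String → PySem.Set String → List (List String) → PySem.Set String × List (List String)
  | [], visited, comps => (visited, comps)
  | node_id :: rest, visited, comps =>
    if (visited.contains node_id : Bool) then pvComponentsLoop adjacency fuel rest visited comps
    else
      let visited1 := visited.add node_id
      let mv := pvBfs adjacency fuel [node_id] visited1 []
      pvComponentsLoop adjacency fuel rest mv.2 (comps ++ [mv.1])

def pvTrueComponents (cn : List (String × List (List (String × String)))) :
    Option (List (List String)) :=
  match pvBuildAdjacency cn with
  | none => none
  | some (node_ids, adjacency, _) =>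
    let fuel := node_ids.length + 2 * ((PySem.Dict.mk cn).getD "edges" []).length + 1
    let vc := pvComponentsLoop adjacency fuel node_ids PySem.Set.empty []
    some (PySem.List.sorted vc.2 (fun m => m.length) true)

def build_collaboration_component_size_distribution (collaboration_network : List (String × List (List (String × String)))) : List (List (String × Int)) :=
  match pvTrueComponents collaboration_network with
  | none => []        -- A raises ValueError here; outside Pre_
  | some comps =>
    let counts := comps.foldl
      (fun d members => d.modify (members.length : Int) 0 (fun c => c + 1)) PySem.Dict.empty
    (PySem.List.sorted2 counts.items (fun p => p.1) (fun p => p.2) false).map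
      (fun p => [("cluster_size", p.1), ("cluster_count", p.2), ("author_count", p.1 * p.2)])

-- ===== PORT B =====
def pvPairsOf (edges : List (List (String × String))) : List (String × String) :=
  edges.map (fun e =>
    (((PySem.Dict.mk e).get? "source").getD "None", ((PySem.Dict.mk e).get? "target").getD "None"))

-- comp | {t for (s,t) in pairs if s in comp} | {s for (s,t) in pairs if t in comp}
def pvExpand (pairs : List (String × String)) (comp : PySem.Set String) : PySem.Set String :=
  PySem.Set.union
    (PySem.Set.union comp
      (PySem.Set.ofList (pairs.filterMap (fun p => if comp.contains p.1 then some p.2 else none))))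
    (PySem.Set.ofList (pairs.filterMap (fun p => if comp.contains p.2 then some p.1 else none)))

-- the `while True` loop of component: grow until nothing changes; fuel is a totality device only
-- (a lemma below shows the fixpoint is always reached before it runs out)
def pvSaturate (pairs : List (String × String)) :
    Nat → PySem.Set String → PySem.Set String
  | 0, comp => comp
  | fuel + 1, comp =>
    let grown := pvExpand pairs comp
    if grown = comp then comp else pvSaturate pairs fuel grown

def pvCompSet (pairs : List (String × String)) (seed : String) : PySem.Set String :=
  pvSaturate pairs (1 + 2 * pairs.length) (PySem.Set.ofList [seed])

def pvComponent (pairs : List (String × String)) (seed : String) : List String :=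
  PySem.List.sorted (pvCompSet pairs seed) (fun x => x) false

def build_collaboration_component_size_distribution_alt (collaboration_network : List (String × List (List (String × String)))) : List (List (String × Int)) :=
  let nodes0 := (PySem.Dict.mk collaboration_network).getD "nodes" []
  let nodes := if nodes0 = [] then [] else nodes0
  let edges0 := (PySem.Dict.mk collaboration_network).getD "edges" []
  let edges := if edges0 = [] then [] else edges0
  let node_ids := nodes.filterMap (fun node =>
    match (PySem.Dict.mk node).get? "id" with
    | some s => if s = "" then none else some s
    | none => none)
  let pairs := pvPairsOf edges
  let clusters : PySem.Set (List String) :=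
    PySem.Set.ofList (node_ids.map (pvComponent pairs))
  let tally : PySem.Dict Int Int := List.foldl
    (fun d c => d.insert (c.length : Int) (d.getD (c.length : Int) 0 + 1)) PySem.Dict.empty clusters
  (PySem.List.sorted2 tally.items (fun p => p.1) (fun p => p.2) false).map
    (fun p => [("cluster_size", p.1), ("cluster_count", p.2), ("author_count", p.1 * p.2)])

-- ===== PRECONDITION & SPEC =====
-- Pre_ excludes exactly the inputs where A raises ValueError: an edge whose "weight" entry is a
-- non-empty string that Python's int() cannot parse.
def Pre_build_collaboration_component_size_distribution (collaboration_network : List (String × List (List (String × String)))) : Prop :=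
  ∀ e ∈ (PySem.Dict.mk collaboration_network).getD "edges" [],
    (match (PySem.Dict.mk e).get? "weight" with
     | none => true
     | some s => s == "" || (PySem.Int.ofStr? s).isSome) = true
instance (collaboration_network : List (String × List (List (String × String)))) : Decidable (Pre_build_collaboration_component_size_distribution collaboration_network) := by unfold Pre_build_collaboration_component_size_distribution; infer_instance

def pvWitness_build_collaboration_component_size_distribution : (List (String × List (List (String × String)))) :=
  [("nodes", [[("id", "a")], [("id", "b")], [("id", "c")]]),
   ("edges", [[("source", "a"), ("target", "b"), ("weight", "2")], [("source", "b"), ("target", "d")]])]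

def Spec_build_collaboration_component_size_distribution (collaboration_network : List (String × List (List (String × String)))) (out : List (List (String × Int))) : Prop := out = build_collaboration_component_size_distribution_alt collaboration_network
instance (collaboration_network : List (String × List (List (String × String)))) (out : List (List (String × Int))) : Decidable (Spec_build_collaboration_component_size_distribution collaboration_network out) := by unfold Spec_build_collaboration_component_size_distribution; infer_instance

-- ===== CLAIM (what is proved, stated in full; the proofs are below) =====
def Claim_equal_build_collaboration_component_size_distribution : Prop := ∀ (collaboration_network : List (String × List (List (String × String)))), Dom_build_collaboration_component_size_distribution collaboration_network → Pre_build_collaboration_component_size_distribution collaboration_network → Spec_build_collaboration_component_size_distribution collaboration_network (build_collaboration_component_size_distribution collaboration_network)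

-- ===== LEMMAS AND PROOFS =====

-- ---------- the undirected step relation of an edge-pair list and its closure ----------
def pvSt (E : List (String × String)) (x y : String) : Prop := (x, y) ∈ E ∨ (y, x) ∈ E

def pvConn (E : List (String × String)) (x y : String) : Prop := Relation.ReflTransGen (pvSt E) x y

theorem pvSt_symm (E : List (String × String)) {x y : String} (h : pvSt E x y) : pvSt E y x :=
  h.elim .inr .inl

theorem pvConn_refl (E : List (String × String)) (x : String) : pvConn E x x :=
  Relation.ReflTransGen.refl

theorem pvConn_symm (E : List (String × String)) {x y : String} (h : pvConn E x y) : pvConn E y x :=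
  Relation.ReflTransGen.symmetric (fun _ _ => pvSt_symm E) h

theorem pvConn_mem_closed {E : List (String × String)} {S : List String}
    (hcl : ∀ x ∈ S, ∀ y, pvSt E x y → y ∈ S) {s y : String} (hs : s ∈ S)
    (h : pvConn E s y) : y ∈ S := by
  induction h with
  | refl => exact hs
  | tail _ hst ih => exact hcl _ ih _ hst

theorem pv_if_nil (l : List (List (String × String))) : (if l = [] then [] else l) = l := by
  split <;> simp_all

-- ---------- the saturation of port B ----------
theorem pv_mem_expand (pairs : List (String × String)) (c : PySem.Set String) (y : String) :
    y ∈ pvExpand pairs c ↔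
      y ∈ c ∨ (∃ a, (a, y) ∈ pairs ∧ a ∈ c) ∨ (∃ b, (y, b) ∈ pairs ∧ b ∈ c) := by
  simp only [pvExpand, PySem.Set.mem_union, PySem.Set.mem_ofList, List.mem_filterMap,
    PySem.Set.contains, List.contains_iff_mem]
  constructor
  · rintro ((h | ⟨p, hp, h⟩) | ⟨p, hp, h⟩)
    · exact .inl h
    · by_cases hc1 : p.1 ∈ c
      · rw [if_pos hc1] at h; injection h with h; subst h
        exact .inr (.inl ⟨p.1, by simpa using hp, hc1⟩)
      · rw [if_neg hc1] at h; cases h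
    · by_cases hc2 : p.2 ∈ c
      · rw [if_pos hc2] at h; injection h with h; subst h
        exact .inr (.inr ⟨p.2, by simpa using hp, hc2⟩)
      · rw [if_neg hc2] at h; cases h
  · rintro (h | ⟨a, hp, h⟩ | ⟨b, hp, h⟩)
    · exact .inl (.inl h)
    · exact .inl (.inr ⟨(a, y), hp, by simp [h]⟩)
    · exact .inr ⟨(y, b), hp, by simp [h]⟩

theorem pv_expand_nodup (pairs : List (String × String)) (c : PySem.Set String)
    (h : c.Nodup) : (pvExpand pairs c).Nodup :=
  PySem.Set.nodup_union _ _ (PySem.Set.nodup_union _ _ h)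

theorem pv_foldl_add_prefix (xs : List String) (s : PySem.Set String) :
    ∃ ext, List.foldl PySem.Set.add s xs = s ++ ext := by
  induction xs generalizing s with
  | nil => exact ⟨[], by simp⟩
  | cons x xs ih =>
    simp only [List.foldl_cons]
    by_cases h : s.contains x = true
    · have : s.add x = s := by unfold PySem.Set.add; rw [if_pos h]
      rw [this]; exact ih s
    · have : s.add x = s ++ [x] := by unfold PySem.Set.add; rw [if_neg h]
      rw [this]
      obtain ⟨ext, hext⟩ := ih (s ++ [x])
      exact ⟨x :: ext, by rw [hext]; simp⟩

theorem pv_expand_prefix (pairs : List (String × String)) (c : PySem.Set String) :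
    ∃ ext, pvExpand pairs c = c ++ ext := by
  unfold pvExpand PySem.Set.union PySem.Set.update
  obtain ⟨e1, he1⟩ := pv_foldl_add_prefix (PySem.Set.ofList (pairs.filterMap
    (fun p => if c.contains p.1 then some p.2 else none))) c
  rw [he1]
  obtain ⟨e2, he2⟩ := pv_foldl_add_prefix (PySem.Set.ofList (pairs.filterMap
    (fun p => if c.contains p.2 then some p.1 else none))) (c ++ e1)
  exact ⟨e1 ++ e2, by rw [he2, List.append_assoc]⟩

def pvIter (pairs : List (String × String)) (n : Nat) (seed : String) : PySem.Set String :=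
  (List.range n).foldl (fun c _ => pvExpand pairs c) (PySem.Set.ofList [seed])

def pvEnds (pairs : List (String × String)) : List String :=
  pairs.flatMap (fun p => [p.1, p.2])

theorem pv_mem_ends_left {pairs : List (String × String)} {p : String × String}
    (hp : p ∈ pairs) : p.1 ∈ pvEnds pairs := by
  simp only [pvEnds, List.mem_flatMap]; exact ⟨p, hp, by simp⟩

theorem pv_mem_ends_right {pairs : List (String × String)} {p : String × String}
    (hp : p ∈ pairs) : p.2 ∈ pvEnds pairs := by
  simp only [pvEnds, List.mem_flatMap]; exact ⟨p, hp, by simp⟩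

theorem pv_ends_length (pairs : List (String × String)) :
    (pvEnds pairs).length = 2 * pairs.length := by
  induction pairs with
  | nil => rfl
  | cons p ps ih => simp [pvEnds] at ih ⊢; omega

theorem pvIter_zero (pairs : List (String × String)) (seed : String) :
    pvIter pairs 0 seed = [seed] := rfl

theorem pvIter_succ (pairs : List (String × String)) (n : Nat) (seed : String) :
    pvIter pairs (n + 1) seed = pvExpand pairs (pvIter pairs n seed) := by
  unfold pvIter
  rw [List.range_succ, List.foldl_append]
  rfl

theorem pvIter_nodup (pairs : List (String × String)) (n : Nat) (seed : String) :
    (pvIter pairs n seed).Nodup := by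
  induction n with
  | zero => simp [pvIter_zero]
  | succ n ih => rw [pvIter_succ]; exact pv_expand_nodup _ _ ih

theorem pvIter_prefix (pairs : List (String × String)) (n : Nat) (seed : String) :
    ∃ ext, pvIter pairs (n + 1) seed = pvIter pairs n seed ++ ext := by
  rw [pvIter_succ]; exact pv_expand_prefix _ _

theorem pvIter_mono (pairs : List (String × String)) {m n : Nat} (h : m ≤ n) (seed : String) :
    ∀ y ∈ pvIter pairs m seed, y ∈ pvIter pairs n seed := by
  induction n with
  | zero => intro y hy; rwa [Nat.le_zero.mp h] at hy
  | succ n ih =>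
    rcases Nat.lt_or_ge m (n + 1) with hlt | hge
    · intro y hy
      obtain ⟨ext, hext⟩ := pvIter_prefix pairs n seed
      rw [hext]
      exact List.mem_append_left _ (ih (Nat.lt_succ_iff.mp hlt) y hy)
    · intro y hy; rwa [Nat.le_antisymm h hge] at hy

theorem pvIter_seed_mem (pairs : List (String × String)) (n : Nat) (seed : String) :
    seed ∈ pvIter pairs n seed :=
  pvIter_mono pairs (Nat.zero_le n) seed seed (by simp [pvIter_zero])

theorem pvIter_sound (pairs : List (String × String)) (n : Nat) (seed : String) :
    ∀ y ∈ pvIter pairs n seed, pvConn pairs seed y := by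
  induction n with
  | zero =>
    intro y hy; rw [pvIter_zero, List.mem_singleton] at hy; subst hy; exact pvConn_refl _ _
  | succ n ih =>
    intro y hy
    rw [pvIter_succ, pv_mem_expand] at hy
    rcases hy with h | ⟨a, hp, ha⟩ | ⟨b, hp, hb⟩
    · exact ih y h
    · exact (ih a ha).tail (.inl hp)
    · exact (ih b hb).tail (.inr hp)

theorem pvIter_subset (pairs : List (String × String)) (n : Nat) (seed : String) :
    ∀ y ∈ pvIter pairs n seed, y ∈ seed :: pvEnds pairs := by
  induction n with
  | zero =>
    intro y hy; rw [pvIter_zero, List.mem_singleton] at hy; subst hy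
    exact List.mem_cons_self
  | succ n ih =>
    intro y hy
    rw [pvIter_succ, pv_mem_expand] at hy
    rcases hy with h | ⟨a, hp, ha⟩ | ⟨b, hp, hb⟩
    · exact ih y h
    · exact List.mem_cons_of_mem _ (pv_mem_ends_right hp)
    · exact List.mem_cons_of_mem _ (pv_mem_ends_left hp)

theorem pvIter_length_le (pairs : List (String × String)) (n : Nat) (seed : String) :
    (pvIter pairs n seed).length ≤ 1 + 2 * pairs.length := by
  have hsub : pvIter pairs n seed ⊆ seed :: pvEnds pairs := pvIter_subset pairs n seed
  have := ((pvIter_nodup pairs n seed).subperm hsub).length_le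
  simp only [List.length_cons, pv_ends_length] at this
  omega

theorem pvIter_growth (pairs : List (String × String)) (seed : String) (n : Nat)
    (h : pvIter pairs (n + 1) seed ≠ pvIter pairs n seed) :
    (pvIter pairs n seed).length + 1 ≤ (pvIter pairs (n + 1) seed).length := by
  obtain ⟨ext, hext⟩ := pvIter_prefix pairs n seed
  rcases ext with _ | ⟨e, ext⟩
  · rw [List.append_nil] at hext; exact absurd hext h
  · rw [hext]; simp

-- the `while True` loop always reaches the fixpoint within the given fuel
theorem pvSaturate_iter (pairs : List (String × String)) (seed : String) :
    ∀ (fuel n : Nat), 2 + 2 * pairs.length ≤ (pvIter pairs n seed).length + fuel →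
    ∃ M, pvSaturate pairs fuel (pvIter pairs n seed) = pvIter pairs M seed ∧
      pvExpand pairs (pvIter pairs M seed) = pvIter pairs M seed := by
  intro fuel
  induction fuel with
  | zero =>
    intro n hb
    have := pvIter_length_le pairs n seed
    omega
  | succ fuel ih =>
    intro n hb
    by_cases h : pvExpand pairs (pvIter pairs n seed) = pvIter pairs n seed
    · exact ⟨n, by simp [pvSaturate, h], h⟩
    · have hstep : pvSaturate pairs (fuel + 1) (pvIter pairs n seed)
          = pvSaturate pairs fuel (pvIter pairs (n + 1) seed) := by
        simp [pvSaturate, h, pvIter_succ]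
      have hne : pvIter pairs (n + 1) seed ≠ pvIter pairs n seed := by
        rw [pvIter_succ]; exact h
      have := pvIter_growth pairs seed n hne
      obtain ⟨M, hM, hfix⟩ := ih (n + 1) (by omega)
      exact ⟨M, hstep.trans hM, hfix⟩

theorem pvCompSet_spec (pairs : List (String × String)) (seed : String) :
    ∃ M, pvCompSet pairs seed = pvIter pairs M seed ∧
      pvExpand pairs (pvIter pairs M seed) = pvIter pairs M seed := by
  have h0 : pvIter pairs 0 seed = PySem.Set.ofList [seed] := rfl
  have := pvSaturate_iter pairs seed (1 + 2 * pairs.length) 0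
    (by rw [pvIter_zero]; simp; omega)
  rw [h0] at this
  exact this

theorem pvCompSet_nodup (pairs : List (String × String)) (seed : String) :
    (pvCompSet pairs seed).Nodup := by
  obtain ⟨M, hM, _⟩ := pvCompSet_spec pairs seed
  rw [hM]; exact pvIter_nodup pairs M seed

theorem pvCompSet_mem (pairs : List (String × String)) (seed : String) (y : String) :
    y ∈ pvCompSet pairs seed ↔ pvConn pairs seed y := by
  obtain ⟨M, hM, hfix⟩ := pvCompSet_spec pairs seed
  rw [hM]
  constructor
  · exact pvIter_sound pairs M seed y
  · refine pvConn_mem_closed ?_ (pvIter_seed_mem pairs M seed)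
    intro x hx z hst
    have : z ∈ pvExpand pairs (pvIter pairs M seed) := by
      rw [pv_mem_expand]
      rcases hst with hp | hp
      · exact .inr (.inl ⟨x, hp, hx⟩)
      · exact .inr (.inr ⟨x, hp, hx⟩)
    rwa [hfix] at this

theorem pv_comp_mem (E : List (String × String)) (s y : String) :
    y ∈ pvComponent E s ↔ pvConn E s y := by
  rw [pvComponent, PySem.List.mem_sorted]
  exact pvCompSet_mem E s y

theorem pv_comp_eq_of_conn (E : List (String × String)) {s t : String} (hc : pvConn E s t) :
    pvComponent E s = pvComponent E t := by
  rw [pvComponent, pvComponent, PySem.List.sorted_id_eq_sorted_id_iff_perm]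
  rw [List.perm_ext_iff_of_nodup (pvCompSet_nodup E s) (pvCompSet_nodup E t)]
  intro y
  rw [pvCompSet_mem, pvCompSet_mem]
  exact ⟨fun h' => (pvConn_symm E hc).trans h', fun h' => hc.trans h'⟩

-- ---------- port A's adjacency dict: neighbours are exactly the step relation ----------
theorem pv_getD_setdefault_nil (d : PySem.Dict String (List (String × Int))) (k x : String) :
    ((d.setdefault k []).getD x []) = d.getD x [] := by
  by_cases hx : x = k
  · subst hx; exact PySem.Dict.getD_setdefault_self d x [] []
  · rw [PySem.Dict.getD_eq_get?_getD, PySem.Dict.get?_setdefault_of_ne d [] hx,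
      ← PySem.Dict.getD_eq_get?_getD]

theorem pv_adj0_getD (node_ids : List String) (x : String) :
    ((node_ids.foldl (fun d k => d.insert k ([] : List (String × Int))) PySem.Dict.empty).getD x []) = [] := by
  suffices h : ∀ (d : PySem.Dict String (List (String × Int))), (∀ z, d.getD z [] = []) →
      ∀ z, ((node_ids.foldl (fun d k => d.insert k ([] : List (String × Int))) d).getD z []) = [] by
    exact h PySem.Dict.empty (fun z => PySem.Dict.getD_empty z []) x
  induction node_ids with
  | nil => intro d hd z; simpa using hd z
  | cons k ks ih =>
    intro d hd z
    simp only [List.foldl_cons]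
    refine ih (d.insert k []) (fun z' => ?_) z
    rw [PySem.Dict.getD_insert]
    split <;> simp [hd]

theorem pv_st_cons (a b x y : String) (E : List (String × String)) :
    pvSt ((a, b) :: E) x y ↔ (x = a ∧ y = b) ∨ (x = b ∧ y = a) ∨ pvSt E x y := by
  simp only [pvSt, List.mem_cons, Prod.mk.injEq]
  tauto

theorem pv_adjLoop_spec (edges : List (List (String × String)))
    (hw : ∀ e ∈ edges, (pvWeightOf e).isSome) :
    ∀ (adj : PySem.Dict String (List (String × Int))) (deg : PySem.Dict String Int),
    ∃ adj' deg', pvAdjacencyLoop edges adj deg = some (adj', deg') ∧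
      ∀ x y, (y ∈ (adj'.getD x []).map Prod.fst ↔
        y ∈ (adj.getD x []).map Prod.fst ∨ pvSt (pvPairsOf edges) x y) := by
  induction edges with
  | nil =>
    intro adj deg
    exact ⟨adj, deg, rfl, by simp [pvPairsOf, pvSt]⟩
  | cons e rest ih =>
    intro adj deg
    obtain ⟨w, hwv⟩ := Option.isSome_iff_exists.mp (hw e (List.mem_cons_self))
    have hwrest : ∀ e' ∈ rest, (pvWeightOf e').isSome := fun e' he' => hw e' (List.mem_cons_of_mem _ he')
    simp only [pvAdjacencyLoop, hwv]
    set a := ((PySem.Dict.mk e).get? "source").getD "None" with ha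
    set b := ((PySem.Dict.mk e).get? "target").getD "None" with hb
    set adj3 := (((adj.setdefault a []).setdefault b []).modify a []
        (fun l => l ++ [(b, w)])).modify b [] (fun l => l ++ [(a, w)]) with hadj3
    obtain ⟨adj', deg', heq, hchar⟩ := ih hwrest adj3
      ((((deg.setdefault a 0).setdefault b 0).modify a 0 (fun x => x + w)).modify b 0 (fun x => x + w))
    refine ⟨adj', deg', heq, fun x y => ?_⟩
    have hadj3c : ∀ x y, y ∈ (adj3.getD x []).map Prod.fst ↔
        y ∈ (adj.getD x []).map Prod.fst ∨ (x = a ∧ y = b) ∨ (x = b ∧ y = a) := by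
      intro x y
      by_cases hxb : x = b <;> by_cases hxa : x = a
      · have hab : a = b := by rw [← hxa]; exact hxb
        simp only [hadj3, PySem.Dict.getD_modify, hxa, hab, if_pos, pv_getD_setdefault_nil,
          List.map_append, List.mem_append]
        simp only [List.map_cons, List.map_nil, List.mem_singleton, true_and]
        tauto
      · have hba : ¬ b = a := fun h => hxa (hxb.trans h)
        simp only [hadj3, PySem.Dict.getD_modify, hxb, pv_getD_setdefault_nil]
        simp [hba]
      · have hab : ¬ a = b := fun h => hxb (hxa.trans h)
        simp only [hadj3, PySem.Dict.getD_modify, hxa, pv_getD_setdefault_nil]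
        simp [hab]
      · simp [hadj3, PySem.Dict.getD_modify, hxa, hxb, pv_getD_setdefault_nil]
    rw [hchar, hadj3c]
    have hpc : pvPairsOf (e :: rest) = (a, b) :: pvPairsOf rest := by
      simp [pvPairsOf, ha, hb]
    rw [hpc, pv_st_cons]
    tauto

-- ---------- port A's BFS ----------
theorem pv_set_mem_iff_contains {α : Type} [BEq α] [LawfulBEq α] (s : PySem.Set α) (x : α) :
    s.contains x = true ↔ x ∈ s := by
  unfold PySem.Set.contains; exact List.contains_iff_mem

theorem pv_set_add_fresh {α : Type} [BEq α] [LawfulBEq α] (s : PySem.Set α) (x : α)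
    (h : x ∉ s) : s.add x = s ++ [x] := by
  unfold PySem.Set.add
  rw [if_neg]
  simp [h]

theorem pv_bfs_inner (nbrs : List (String × Int)) :
    ∀ (V : PySem.Set String) (Q : List String),
    ∃ new : List String,
      nbrs.foldl (fun (vq : PySem.Set String × List String) neighbor =>
          let neighbor_id := neighbor.1
          if vq.1.contains neighbor_id then vq
          else (vq.1.add neighbor_id, vq.2 ++ [neighbor_id])) (V, Q) = (V ++ new, Q ++ new) ∧
      new.Nodup ∧ (∀ y ∈ new, y ∉ V ∧ y ∈ nbrs.map Prod.fst) ∧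
      (∀ y ∈ nbrs.map Prod.fst, y ∈ V ++ new) := by
  induction nbrs with
  | nil => exact fun V Q => ⟨[], by simp⟩
  | cons nb rest ih =>
    intro V Q
    simp only [List.foldl_cons]
    by_cases h : nb.1 ∈ V
    · rw [if_pos ((pv_set_mem_iff_contains V nb.1).mpr h)]
      obtain ⟨new, heq, hnd, hfresh, hcov⟩ := ih V Q
      refine ⟨new, heq, hnd, ?_, ?_⟩
      · exact fun y hy => ⟨(hfresh y hy).1, List.mem_cons_of_mem _ (hfresh y hy).2⟩
      · intro y hy
        rcases List.mem_cons.mp hy with rfl | hy'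
        · exact List.mem_append_left _ h
        · exact hcov y hy'
    · rw [if_neg (by simp [h])]
      simp only [pv_set_add_fresh V nb.1 h]
      obtain ⟨new, heq, hnd, hfresh, hcov⟩ := ih (V ++ [nb.1]) (Q ++ [nb.1])
      rw [heq, List.append_assoc, List.append_assoc]
      refine ⟨nb.1 :: new, rfl, ?_, ?_, ?_⟩
      · refine List.nodup_cons.mpr ⟨fun hmem => ?_, hnd⟩
        exact (hfresh _ hmem).1 (List.mem_append_right _ (List.mem_singleton.mpr rfl))
      · intro y hy
        rcases List.mem_cons.mp hy with rfl | hy'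
        · exact ⟨h, List.mem_cons_self⟩
        · obtain ⟨hyv, hynb⟩ := hfresh y hy'
          exact ⟨fun hc => hyv (List.mem_append_left _ hc), List.mem_cons_of_mem _ hynb⟩
      · intro y hy
        rcases List.mem_cons.mp hy with rfl | hy'
        · simp
        · have := hcov y hy'
          simp only [List.append_assoc] at this
          simpa using this
theorem pv_filter_count (U V new : List String) (hU : U.Nodup) (hnew : new.Nodup)
    (hsubU : ∀ y ∈ new, y ∈ U) (hfresh : ∀ y ∈ new, y ∉ V) :
    (U.filter (fun u => decide (u ∉ V ++ new))).length + new.length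
      = (U.filter (fun u => decide (u ∉ V))).length := by
  have hsplit := (List.length_eq_length_filter_add (l := U.filter (fun u => decide (u ∉ V)))
    (fun u => decide (u ∈ new))).symm
  have h1 : U.filter (fun u => decide (u ∉ V ++ new))
      = (U.filter (fun u => decide (u ∉ V))).filter (fun u => !decide (u ∈ new)) := by
    rw [List.filter_filter]
    apply List.filter_congr
    intro u _
    by_cases h1 : u ∈ V <;> by_cases h2 : u ∈ new <;>
      simp [List.mem_append, h1, h2]
  have h2 : ((U.filter (fun u => decide (u ∉ V))).filter (fun u => decide (u ∈ new))).length
      = new.length := by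
    apply List.Perm.length_eq
    rw [List.perm_ext_iff_of_nodup (((hU.filter _)).filter _) hnew]
    intro y
    simp only [List.mem_filter, decide_eq_true_eq]
    constructor
    · rintro ⟨_, hy⟩; exact hy
    · intro hy; exact ⟨⟨hsubU y hy, hfresh y hy⟩, hy⟩
  rw [h1]
  omega

theorem pv_bfs_nil (adj : PySem.Dict String (List (String × Int))) (f : Nat)
    (V : PySem.Set String) (M : List String) : pvBfs adj f [] V M = (M, V) := by
  cases f <;> rfl

theorem pv_bfs_spec
    (adj : PySem.Dict String (List (String × Int))) (E : List (String × String))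
    (hAdj : ∀ x y, (y ∈ (adj.getD x []).map Prod.fst) ↔ pvSt E x y)
    (P : String → Prop) (hPcl : ∀ x y, P x → pvSt E x y → P y) (V₀ : List String) :
    ∀ (fuel : Nat) (Q M : List String) (V : PySem.Set String),
    (∀ y, y ∈ V ↔ (y ∈ V₀ ∨ y ∈ M ∨ y ∈ Q)) →
    ((M ++ Q).Nodup) →
    (∀ y ∈ M ++ Q, y ∉ V₀) →
    (∀ x ∈ M, ∀ y, pvSt E x y → y ∈ V) →
    (∀ x ∈ M ++ Q, P x) →
    (Q.length + ((PySem.List.dedup (pvEnds E)).filter (fun u => decide (u ∉ V))).length ≤ fuel) →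
    ∃ M' V', pvBfs adj fuel Q V M = (M', V') ∧
      M'.Nodup ∧ (∀ y, y ∈ V' ↔ (y ∈ V₀ ∨ y ∈ M')) ∧ (∀ x ∈ M', P x) ∧
      (∀ x ∈ M', ∀ y, pvSt E x y → y ∈ V') ∧ (∀ x ∈ M ++ Q, x ∈ M') ∧ (∀ y ∈ M', y ∉ V₀) := by
  intro fuel
  induction fuel with
  | zero =>
    intro Q M V h1 h2 h3 h4 h5 h6
    cases Q with
    | nil =>
      refine ⟨M, V, pv_bfs_nil adj 0 V M, by simpa using h2, fun y => ?_, by simpa using h5,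
        h4, fun x hx => by simpa using hx, by simpa using h3⟩
      rw [h1 y]; simp
    | cons c Q' => simp only [List.length_cons] at h6; omega
  | succ fuel ih =>
    intro Q M V h1 h2 h3 h4 h5 h6
    cases Q with
    | nil =>
      refine ⟨M, V, pv_bfs_nil adj _ V M, by simpa using h2, fun y => ?_, by simpa using h5,
        h4, fun x hx => by simpa using hx, by simpa using h3⟩
      rw [h1 y]; simp
    | cons c Q' =>
      obtain ⟨new, hinner, hndnew, hfreshnew, hcov⟩ := pv_bfs_inner (adj.getD c []) V Q'
      have hstep : pvBfs adj (fuel + 1) (c :: Q') V M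
          = pvBfs adj fuel (Q' ++ new) (V ++ new) (M ++ [c]) := by
        show pvBfs adj fuel _ _ _ = _
        rw [hinner]
      have hcV : c ∈ V := (h1 c).mpr (.inr (.inr List.mem_cons_self))
      have hMQV : ∀ y ∈ M ++ (c :: Q'), y ∈ V := by
        intro y hy
        rcases List.mem_append.mp hy with hy | hy
        · exact (h1 y).mpr (.inr (.inl hy))
        · exact (h1 y).mpr (.inr (.inr hy))
      have hnewSt : ∀ y ∈ new, pvSt E c y := fun y hy => (hAdj c y).mp (hfreshnew y hy).2
      have hnewU : ∀ y ∈ new, y ∈ PySem.List.dedup (pvEnds E) := by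
        intro y hy
        rw [PySem.List.mem_dedup]
        rcases hnewSt y hy with hp | hp
        · exact pv_mem_ends_right hp
        · exact pv_mem_ends_left hp
      have hnewV : ∀ y ∈ new, y ∉ V := fun y hy => (hfreshnew y hy).1
      have harr : (M ++ [c]) ++ (Q' ++ new) = (M ++ c :: Q') ++ new := by simp
      obtain ⟨M', V', hrun, c1, c2, c3, c4, c5, c6⟩ :=
        ih (Q' ++ new) (M ++ [c]) (V ++ new)
          (by
            intro y
            constructor
            · intro hv
              rcases List.mem_append.mp hv with hv | hn
              · rcases (h1 y).mp hv with h | h | h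
                · exact .inl h
                · exact .inr (.inl (List.mem_append_left _ h))
                · rcases List.mem_cons.mp h with rfl | h
                  · exact .inr (.inl (List.mem_append_right _ List.mem_cons_self))
                  · exact .inr (.inr (List.mem_append_left _ h))
              · exact .inr (.inr (List.mem_append_right _ hn))
            · intro h
              rcases h with h | h | h
              · exact List.mem_append_left _ ((h1 y).mpr (.inl h))
              · rcases List.mem_append.mp h with h | h
                · exact List.mem_append_left _ ((h1 y).mpr (.inr (.inl h)))
                · rw [List.mem_singleton] at h
                  subst h
                  exact List.mem_append_left _ hcV
              · rcases List.mem_append.mp h with h | h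
                · exact List.mem_append_left _ ((h1 y).mpr (.inr (.inr (List.mem_cons_of_mem _ h))))
                · exact List.mem_append_right _ h)
          (by
            rw [harr]
            refine h2.append hndnew ?_
            intro x hx hxn
            exact hnewV x hxn (hMQV x hx))
          (by
            rw [harr]
            intro y hy
            rcases List.mem_append.mp hy with hy | hy
            · exact h3 y hy
            · exact fun hy0 => hnewV y hy ((h1 y).mpr (.inl hy0)))
          (by
            intro x hx y hst
            rcases List.mem_append.mp hx with hx | hx
            · exact List.mem_append_left _ (h4 x hx y hst)
            · rw [List.mem_singleton] at hx
              subst hx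
              exact hcov y ((hAdj x y).mpr hst))
          (by
            rw [harr]
            intro x hx
            rcases List.mem_append.mp hx with hx | hx
            · exact h5 x hx
            · exact hPcl c x (h5 c (by simp)) (hnewSt x hx))
          (by
            have hcount := pv_filter_count (PySem.List.dedup (pvEnds E)) V new
              (PySem.List.nodup_dedup _) hndnew hnewU hnewV
            simp only [List.length_append, List.length_cons] at h6 ⊢
            omega)
      refine ⟨M', V', hstep.trans hrun, c1, c2, c3, c4, ?_, c6⟩
      intro x hx
      apply c5
      rw [harr]
      exact List.mem_append_left _ hx

theorem pv_set_add_mem {α : Type} [BEq α] [LawfulBEq α] (s : PySem.Set α) (x : α)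
    (h : x ∈ s) : s.add x = s := by
  unfold PySem.Set.add
  rw [if_pos ((pv_set_mem_iff_contains s x).mpr h)]

theorem pv_ofList_append_singleton {α : Type} [BEq α] [LawfulBEq α] (xs : List α) (x : α) :
    PySem.Set.ofList (xs ++ [x]) = (PySem.Set.ofList xs).add x := by
  rw [PySem.Set.ofList_eq_foldl, PySem.Set.ofList_eq_foldl, List.foldl_append]
  rfl

theorem pv_dedup_length_le (xs : List String) :
    (PySem.List.dedup xs).length ≤ xs.length :=
  ((PySem.List.nodup_dedup xs).subperm
    (fun _ h => (PySem.List.mem_dedup xs _).mp h)).length_le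

theorem pv_bfs_run
    (adj : PySem.Dict String (List (String × Int))) (E : List (String × String))
    (hAdj : ∀ x y, (y ∈ (adj.getD x []).map Prod.fst) ↔ pvSt E x y)
    (V₀ : PySem.Set String) (seed : String)
    (hV₀cl : ∀ x ∈ V₀, ∀ y, pvSt E x y → y ∈ V₀) (hseed : seed ∉ V₀)
    (fuel : Nat) (hfuel : 1 + 2 * E.length ≤ fuel) :
    ∃ M' V', pvBfs adj fuel [seed] (V₀.add seed) [] = (M', V') ∧
      M'.Nodup ∧ (∀ y, y ∈ M' ↔ pvConn E seed y) ∧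
      (∀ y, y ∈ V' ↔ (y ∈ V₀ ∨ y ∈ M')) := by
  obtain ⟨M', V', hrun, c1, c2, c3, c4, c5, c6⟩ :=
    pv_bfs_spec adj E hAdj (pvConn E seed)
      (fun x y hp hst => hp.tail hst) V₀ fuel [seed] [] (V₀.add seed)
      (by
        intro y
        rw [pv_set_add_fresh V₀ seed hseed]
        simp [List.mem_append])
      (by simp)
      (by simpa using hseed)
      (by simp)
      (by
        intro x hx
        rw [List.nil_append, List.mem_singleton] at hx
        subst hx
        exact pvConn_refl E x)
      (by
        have h1 : ((PySem.List.dedup (pvEnds E)).filter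
            (fun u => decide (u ∉ V₀.add seed))).length ≤ (pvEnds E).length := by
          exact le_trans (List.length_filter_le _ _) (pv_dedup_length_le _)
        rw [pv_ends_length] at h1
        simp only [List.length_cons, List.length_nil]
        omega)
  have hseedM : seed ∈ M' := c5 seed (by simp)
  have hV'cl : ∀ x ∈ V', ∀ y, pvSt E x y → y ∈ V' := by
    intro x hx y hst
    rcases (c2 x).mp hx with hx0 | hxM
    · exact (c2 y).mpr (.inl (hV₀cl x hx0 y hst))
    · exact c4 x hxM y hst
  refine ⟨M', V', hrun, c1, fun y => ⟨c3 y, fun hconn => ?_⟩, c2⟩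
  have hyV' : y ∈ V' := pvConn_mem_closed hV'cl ((c2 seed).mpr (.inr hseedM)) hconn
  rcases (c2 y).mp hyV' with hy0 | hyM
  · exact absurd (pvConn_mem_closed hV₀cl hy0 (pvConn_symm E hconn)) hseed
  · exact hyM

-- ---------- the outer loop over node_ids, jointly with port B's cluster set ----------
theorem pv_outer
    (adj : PySem.Dict String (List (String × Int))) (E : List (String × String))
    (hAdj : ∀ x y, (y ∈ (adj.getD x []).map Prod.fst) ↔ pvSt E x y)
    (fuel : Nat) (hfuel : 1 + 2 * E.length ≤ fuel) :
    ∀ (seeds done : List String) (V : PySem.Set String) (C : List (List String)),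
    (∀ y, y ∈ V ↔ ∃ s ∈ done, pvConn E s y) →
    ∃ V' D,
      pvComponentsLoop adj fuel seeds V C = (V', C ++ D) ∧
      (seeds.map (pvComponent E)).foldl PySem.Set.add
          (PySem.Set.ofList (done.map (pvComponent E)))
        = PySem.Set.ofList (done.map (pvComponent E))
          ++ D.map (fun m => PySem.List.sorted m (fun x => x) false) := by
  intro seeds
  induction seeds with
  | nil =>
    intro done V C hV
    exact ⟨V, [], by simp [pvComponentsLoop], by simp⟩
  | cons s rest ih =>
    intro done V C hV
    have hVcl : ∀ x ∈ V, ∀ y, pvSt E x y → y ∈ V := by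
      intro x hx y hst
      obtain ⟨s₀, hs₀, hc⟩ := (hV x).mp hx
      exact (hV y).mpr ⟨s₀, hs₀, hc.tail hst⟩
    by_cases hsV : s ∈ V
    · obtain ⟨s₀, hs₀, hc⟩ := (hV s).mp hsV
      have hVdone' : ∀ y, y ∈ V ↔ ∃ t ∈ done ++ [s], pvConn E t y := by
        intro y
        rw [hV y]
        constructor
        · rintro ⟨t, ht, hcy⟩; exact ⟨t, List.mem_append_left _ ht, hcy⟩
        · rintro ⟨t, ht, hcy⟩
          rcases List.mem_append.mp ht with ht | ht
          · exact ⟨t, ht, hcy⟩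
          · rw [List.mem_singleton] at ht
            subst ht
            exact ⟨s₀, hs₀, hc.trans hcy⟩
      obtain ⟨V', D, hloop, hfold⟩ := ih (done ++ [s]) V C hVdone'
      have hcompEq : pvComponent E s = pvComponent E s₀ :=
        (pv_comp_eq_of_conn E hc).symm
      have hKeq : PySem.Set.ofList ((done ++ [s]).map (pvComponent E))
          = PySem.Set.ofList (done.map (pvComponent E)) := by
        rw [List.map_append, List.map_singleton, pv_ofList_append_singleton]
        apply pv_set_add_mem
        rw [PySem.Set.mem_ofList]
        rw [hcompEq]
        exact List.mem_map_of_mem hs₀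
      rw [hKeq] at hfold
      refine ⟨V', D, ?_, ?_⟩
      · simp only [pvComponentsLoop]
        rw [if_pos ((pv_set_mem_iff_contains V s).mpr hsV)]
        exact hloop
      · rw [List.map_cons, List.foldl_cons]
        have : (PySem.Set.ofList (done.map (pvComponent E))).add
            (pvComponent E s) = PySem.Set.ofList (done.map (pvComponent E)) := by
          apply pv_set_add_mem
          rw [PySem.Set.mem_ofList, hcompEq]
          exact List.mem_map_of_mem hs₀
        rw [this]
        exact hfold
    · obtain ⟨members, V₂, hrun, hnd, hmem, hV₂⟩ :=
        pv_bfs_run adj E hAdj V s hVcl hsV fuel hfuel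
      have hV₂' : ∀ y, y ∈ V₂ ↔ ∃ t ∈ done ++ [s], pvConn E t y := by
        intro y
        rw [hV₂ y]
        constructor
        · rintro (hy | hy)
          · obtain ⟨t, ht, hcy⟩ := (hV y).mp hy
            exact ⟨t, List.mem_append_left _ ht, hcy⟩
          · exact ⟨s, List.mem_append_right _ List.mem_cons_self, (hmem y).mp hy⟩
        · rintro ⟨t, ht, hcy⟩
          rcases List.mem_append.mp ht with ht | ht
          · exact .inl ((hV y).mpr ⟨t, ht, hcy⟩)
          · rw [List.mem_singleton] at ht
            subst ht
            exact .inr ((hmem y).mpr hcy)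
      obtain ⟨V', D', hloop, hfold⟩ := ih (done ++ [s]) V₂ (C ++ [members]) hV₂'
      have hsorted : PySem.List.sorted members (fun x => x) false = pvComponent E s := by
        rw [pvComponent, PySem.List.sorted_id_eq_sorted_id_iff_perm]
        rw [List.perm_ext_iff_of_nodup hnd (pvCompSet_nodup E s)]
        intro y
        rw [hmem y, pvCompSet_mem E s y]
      have hfreshK : pvComponent E s ∉
          PySem.Set.ofList (done.map (pvComponent E)) := by
        intro hmemK
        rw [PySem.Set.mem_ofList, List.mem_map] at hmemK
        obtain ⟨t, ht, hteq⟩ := hmemK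
        have hst : s ∈ pvComponent E t := by
          rw [hteq, pv_comp_mem E]
          exact pvConn_refl E s
        rw [pv_comp_mem E] at hst
        exact hsV ((hV s).mpr ⟨t, ht, hst⟩)
      have hKeq : PySem.Set.ofList ((done ++ [s]).map (pvComponent E))
          = PySem.Set.ofList (done.map (pvComponent E)) ++ [pvComponent E s] := by
        rw [List.map_append, List.map_singleton, pv_ofList_append_singleton]
        exact pv_set_add_fresh _ _ hfreshK
      rw [hKeq] at hfold
      refine ⟨V', members :: D', ?_, ?_⟩
      · simp only [pvComponentsLoop]
        rw [if_neg (by simp [hsV])]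
        show pvComponentsLoop adj fuel rest (pvBfs adj fuel [s] (V.add s) []).2
            (C ++ [(pvBfs adj fuel [s] (V.add s) []).1]) = _
        rw [hrun, hloop]
        simp
      · rw [List.map_cons, List.foldl_cons]
        have : (PySem.Set.ofList (done.map (pvComponent E))).add
            (pvComponent E s) = PySem.Set.ofList (done.map (pvComponent E))
              ++ [pvComponent E s] := pv_set_add_fresh _ _ hfreshK
        rw [this, hfold, List.map_cons, hsorted, List.append_assoc]
        rfl

-- ---------- sorting the (size, count) items: distinct keys make sorted2 a key sort ----------
theorem pv_insertBy_cons {α : Type} (b : α → α → Bool) (x y : α) (ys : List α) :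
    PySem.List.insertBy b x (y :: ys)
      = if b x y then x :: y :: ys else y :: PySem.List.insertBy b x ys := rfl

theorem pv_insertBy_congr {α : Type} (b₁ b₂ : α → α → Bool) (x : α) :
    ∀ (acc : List α), (∀ a ∈ acc, b₁ x a = b₂ x a) →
    PySem.List.insertBy b₁ x acc = PySem.List.insertBy b₂ x acc := by
  intro acc
  induction acc with
  | nil => intro _; rfl
  | cons y ys ih =>
    intro h
    rw [pv_insertBy_cons, pv_insertBy_cons, h y List.mem_cons_self,
      ih (fun a ha => h a (List.mem_cons_of_mem _ ha))]

theorem pv_foldl_insertBy_congr {α : Type} (b₁ b₂ : α → α → Bool) :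
    ∀ (l acc : List α), (∀ x ∈ l, ∀ a ∈ acc, b₁ x a = b₂ x a) →
    (∀ x ∈ l, ∀ a ∈ l, b₁ x a = b₂ x a) →
    l.foldl (fun acc x => PySem.List.insertBy b₁ x acc) acc
      = l.foldl (fun acc x => PySem.List.insertBy b₂ x acc) acc := by
  intro l
  induction l with
  | nil => intro _ _ _; rfl
  | cons x l ih =>
    intro acc hacc hl
    simp only [List.foldl_cons]
    rw [pv_insertBy_congr b₁ b₂ x acc (hacc x List.mem_cons_self)]
    apply ih
    · intro z hz a ha
      rw [PySem.List.mem_insertBy] at ha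
      rcases ha with rfl | ha
      · exact hl z (List.mem_cons_of_mem _ hz) a List.mem_cons_self
      · exact hacc z (List.mem_cons_of_mem _ hz) a ha
    · intro z hz a ha
      exact hl z (List.mem_cons_of_mem _ hz) a (List.mem_cons_of_mem _ ha)

theorem pv_sorted2_eq_sorted_of_nodup_keys (xs : List (Int × Int))
    (hnd : (xs.map Prod.fst).Nodup) :
    PySem.List.sorted2 xs (fun p => p.1) (fun p => p.2) false
      = PySem.List.sorted xs (fun p => p.1) false := by
  have hinj : ∀ a ∈ xs, ∀ b ∈ xs, a.1 = b.1 → a = b :=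
    List.inj_on_of_nodup_map hnd
  show xs.foldl (fun acc x => PySem.List.insertBy
      (fun a b => decide (a.1 < b.1) || !decide (b.1 < a.1) && decide (a.2 < b.2)) x acc) []
    = xs.foldl (fun acc x => PySem.List.insertBy (fun a b => decide (a.1 < b.1)) x acc) []
  apply pv_foldl_insertBy_congr
  · intro _ _ a ha; cases ha
  · intro a ha b hb
    rcases lt_trichotomy a.1 b.1 with h | h | h
    · simp [h]
    · have hab : a = b := hinj a ha b hb h
      subst hab
      simp
    · simp [h, lt_asymm h]

theorem pv_sorted_key_eq_of_perm (xs ys : List (Int × Int)) (h : xs.Perm ys)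
    (hnd : (xs.map Prod.fst).Nodup) :
    PySem.List.sorted xs (fun p => p.1) false = PySem.List.sorted ys (fun p => p.1) false := by
  have hzp : (PySem.List.sorted xs (fun p => p.1) false).Perm ys :=
    (PySem.List.sorted_perm xs (fun p => p.1) false).trans h
  have hndz : ((PySem.List.sorted xs (fun p => p.1) false).map Prod.fst).Nodup :=
    ((PySem.List.sorted_perm xs (fun p => p.1) false).map Prod.fst).nodup_iff.mpr hnd
  have hle := PySem.List.sorted_pairwise xs (fun p => p.1)
  have hne : (PySem.List.sorted xs (fun p => p.1) false).Pairwise (fun a b => a.1 ≠ b.1) := by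
    rw [← List.pairwise_map (f := Prod.fst)]
    exact hndz
  exact (PySem.List.sorted_eq_of_perm_of_pairwise_lt ys _ _ hzp
    ((hle.and hne).imp (fun {a b} hab => lt_of_le_of_ne hab.1 hab.2))).symm

theorem pv_sorted2_items_counter_perm (xs ys : List Int) (h : xs.Perm ys) :
    PySem.List.sorted2 (PySem.Dict.counter xs).items (fun p => p.1) (fun p => p.2) false
      = PySem.List.sorted2 (PySem.Dict.counter ys).items (fun p => p.1) (fun p => p.2) false := by
  have hndx : ((PySem.Dict.counter xs).items.map Prod.fst).Nodup := by
    rw [PySem.Dict.items_counter, List.map_map]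
    rw [show (Prod.fst ∘ fun k => ((k, (xs.count k : Int)) : Int × Int)) = (fun k => k) from rfl]
    rw [List.map_id']
    exact PySem.Set.nodup_ofList xs
  have hndy : ((PySem.Dict.counter ys).items.map Prod.fst).Nodup := by
    rw [PySem.Dict.items_counter, List.map_map]
    rw [show (Prod.fst ∘ fun k => ((k, (ys.count k : Int)) : Int × Int)) = (fun k => k) from rfl]
    rw [List.map_id']
    exact PySem.Set.nodup_ofList ys
  have hperm : (PySem.Dict.counter xs).items.Perm (PySem.Dict.counter ys).items := by
    rw [PySem.Dict.items_counter, PySem.Dict.items_counter]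
    have hsets : (PySem.Set.ofList xs : List Int).Perm (PySem.Set.ofList ys) := by
      rw [List.perm_ext_iff_of_nodup (PySem.Set.nodup_ofList xs) (PySem.Set.nodup_ofList ys)]
      intro a
      rw [PySem.Set.mem_ofList, PySem.Set.mem_ofList]
      exact ⟨fun ha => h.mem_iff.mp ha, fun ha => h.mem_iff.mpr ha⟩
    have hfun : (PySem.Set.ofList ys : List Int).map (fun k => ((k, (ys.count k : Int)) : Int × Int))
        = (PySem.Set.ofList ys : List Int).map (fun k => (k, (xs.count k : Int))) := by
      apply List.map_congr_left
      intro k _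
      rw [← h.count_eq k]
    rw [hfun]
    exact hsets.map _
  rw [pv_sorted2_eq_sorted_of_nodup_keys _ hndx, pv_sorted2_eq_sorted_of_nodup_keys _ hndy]
  exact pv_sorted_key_eq_of_perm _ _ hperm hndx

-- ---------- assembling the two ports ----------
theorem pv_build_spec (cn : List (String × List (List (String × String))))
    (hpre : Pre_build_collaboration_component_size_distribution cn) :
    ∃ adj deg, pvBuildAdjacency cn
        = some (pvNodeIds ((PySem.Dict.mk cn).getD "nodes" []), adj, deg) ∧
      ∀ x y, (y ∈ (adj.getD x []).map Prod.fst)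
        ↔ pvSt (pvPairsOf ((PySem.Dict.mk cn).getD "edges" [])) x y := by
  have hw : ∀ e ∈ (PySem.Dict.mk cn).getD "edges" [], (pvWeightOf e).isSome := by
    intro e he
    have hp := hpre e he
    unfold pvWeightOf
    cases hq : (PySem.Dict.mk e).get? "weight" with
    | none => rfl
    | some w =>
      rw [hq] at hp
      have hp' : (w == "" || (PySem.Int.ofStr? w).isSome) = true := hp
      show (if w = "" then some (1 : Int) else PySem.Int.ofStr? w).isSome = true
      by_cases hs : w = ""
      · rw [if_pos hs]; rfl
      · rw [if_neg hs]
        simpa [hs] using hp'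
  obtain ⟨adj, deg, heq, hchar⟩ := pv_adjLoop_spec ((PySem.Dict.mk cn).getD "edges" []) hw
    ((pvNodeIds ((PySem.Dict.mk cn).getD "nodes" [])).foldl
      (fun d k => d.insert k ([] : List (String × Int))) PySem.Dict.empty)
    ((pvNodeIds ((PySem.Dict.mk cn).getD "nodes" [])).foldl
      (fun d k => d.insert k (0 : Int)) PySem.Dict.empty)
  refine ⟨adj, deg, ?_, ?_⟩
  · simp only [pvBuildAdjacency, pv_if_nil, heq]
  · intro x y
    rw [hchar x y]
    constructor
    · rintro (hmem | hst)
      · rw [pv_adj0_getD] at hmem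
        simp at hmem
      · exact hst
    · exact .inr

theorem pv_main (cn : List (String × List (List (String × String))))
    (hpre : Pre_build_collaboration_component_size_distribution cn) :
    build_collaboration_component_size_distribution cn
      = build_collaboration_component_size_distribution_alt cn := by
  obtain ⟨adj, deg, hbuild, hAdj⟩ := pv_build_spec cn hpre
  have halt : build_collaboration_component_size_distribution_alt cn
      = (PySem.List.sorted2
          (List.foldl (fun d c => d.insert (c.length : Int) (d.getD (c.length : Int) 0 + 1))
            PySem.Dict.empty
            (PySem.Set.ofList ((pvNodeIds ((PySem.Dict.mk cn).getD "nodes" [])).map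
              (pvComponent (pvPairsOf ((PySem.Dict.mk cn).getD "edges" [])))))).items
          (fun p => p.1) (fun p => p.2) false).map
        (fun p => [("cluster_size", p.1), ("cluster_count", p.2), ("author_count", p.1 * p.2)]) := by
    simp only [build_collaboration_component_size_distribution_alt, pv_if_nil]
    rfl
  have hfuelB : 1 + 2 * (pvPairsOf ((PySem.Dict.mk cn).getD "edges" [])).length
      ≤ (pvNodeIds ((PySem.Dict.mk cn).getD "nodes" [])).length
        + 2 * ((PySem.Dict.mk cn).getD "edges" []).length + 1 := by
    simp only [pvPairsOf, List.length_map]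
    omega
  obtain ⟨V', D, hloop, hfold⟩ := pv_outer adj (pvPairsOf ((PySem.Dict.mk cn).getD "edges" []))
    hAdj
    ((pvNodeIds ((PySem.Dict.mk cn).getD "nodes" [])).length
      + 2 * ((PySem.Dict.mk cn).getD "edges" []).length + 1)
    hfuelB
    (pvNodeIds ((PySem.Dict.mk cn).getD "nodes" [])) [] PySem.Set.empty []
    (by intro y; simp [PySem.Set.empty])
  have hcomps : pvTrueComponents cn
      = some (PySem.List.sorted D (fun m => m.length) true) := by
    simp only [pvTrueComponents, hbuild]
    rw [hloop]
    rfl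
  have hAout : build_collaboration_component_size_distribution cn
      = (PySem.List.sorted2
          (PySem.Dict.counter ((PySem.List.sorted D (fun m => m.length) true).map
            (fun m => (m.length : Int)))).items
          (fun p => p.1) (fun p => p.2) false).map
        (fun p => [("cluster_size", p.1), ("cluster_count", p.2), ("author_count", p.1 * p.2)]) := by
    simp only [build_collaboration_component_size_distribution, hcomps]
    rw [PySem.Dict.counter_eq_foldl, List.foldl_map]
  have hclusters : (PySem.Set.ofList ((pvNodeIds ((PySem.Dict.mk cn).getD "nodes" [])).map
        (pvComponent (pvPairsOf ((PySem.Dict.mk cn).getD "edges" [])))) : List (List String))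
      = D.map (fun m => PySem.List.sorted m (fun x => x) false) := by
    rw [PySem.Set.ofList_eq_foldl]
    simpa using hfold
  have hBtally : ∀ (clusters : List (List String)),
      List.foldl (fun d c => d.insert (c.length : Int) (d.getD (c.length : Int) 0 + 1))
          PySem.Dict.empty clusters
        = PySem.Dict.counter (clusters.map (fun c => (c.length : Int))) := by
    intro clusters
    rw [← PySem.Dict.foldl_insert_getD_add_one_eq_counter, List.foldl_map]
  have hmapmap : (D.map (fun m => PySem.List.sorted m (fun x => x) false)).map
        (fun c => (c.length : Int)) = D.map (fun m => (m.length : Int)) := by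
    rw [List.map_map]
    apply List.map_congr_left
    intro m _
    simp [PySem.List.length_sorted]
  have hperm : ((PySem.List.sorted D (fun m => m.length) true).map
        (fun m => (m.length : Int))).Perm (D.map (fun m => (m.length : Int))) :=
    (PySem.List.sorted_perm D (fun m => m.length) true).map _
  rw [hAout, halt, hclusters, hBtally, hmapmap]
  exact congrArg _ (pv_sorted2_items_counter_perm _ _ hperm)

-- ===== VERDICT (by name: the statement is the Claim_ definition above) =====
theorem build_collaboration_component_size_distribution_spec : Claim_equal_build_collaboration_component_size_distribution := by
  intro collaboration_network _ hpre
  unfold Spec_build_collaboration_component_size_distribution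
  exact pv_main collaboration_network hpre
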